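-- pv_equiv track=rewrite | github.com/jjoshua2/arc_agi | unsolved/2025-10-12T23-29-09Z/e5062a87_best1.py | transform
-- ===== SOURCE A (Python) =====
-- def transform(grid_lst: list[list[int]]) -> list[list[int]]:
--     if not grid_lst or not grid_lst[0]:
--         return []
--     grid = [row[:] for row in grid_lst]
--     rows = len(grid)
--     cols = len(grid[0])
--
--     def scan_line(line):
--         n = len(line)
--         i = 0
--         current_length = 0
--         seen = False
--         while i < n:
--             if line[i] == 2:
--                 current_length += 1
--                 seen = True
--                 i += 1
--                 continue
--             if line[i] == 0 and seen:
--                 line[i] = 2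
--                 current_length += 1
--                 i += 1
--                 continue
--             if line[i] == 5:
--                 if current_length >= 2:
--                     seen = True
--                 else:
--                     seen = False
--                 current_length = 0
--                 i += 1
--                 continue
--             seen = False
--             current_length = 0
--             i += 1
--         return line
--
--     changed = True
--     while changed:
--         changed = False
--         # Horizontal
--         for r in range(rows):
--             old = grid[r][:]
--             scan_line(grid[r])
--             if grid[r] != old:
--                 changed = True
--         # Vertical
--         for c in range(cols):
--             old_line = [grid[r][c] for r in range(rows)]
--             line = [grid[r][c] for r in range(rows)]
--             scan_line(line)
--             if line != old_line:
--                 changed = True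
--                 for r in range(rows):
--                     grid[r][c] = line[r]
--
--     return grid
-- ===== SOURCE B (Python) =====
-- def transform(grid_lst: list[list[int]]) -> list[list[int]]:
--     if not grid_lst or not grid_lst[0]:
--         return []
--     grid = [row[:] for row in grid_lst]
--     rows = len(grid)
--     cols = len(grid[0])
--
--     def scan(line):
--         out = []
--         seen = False
--         run = 0
--         for v in line:
--             if v == 2 or (v == 0 and seen):
--                 out.append(2)
--                 seen = True
--                 run += 1
--             elif v == 5:
--                 out.append(5)
--                 seen = run >= 2
--                 run = 0
--             else:
--                 out.append(v)
--                 seen = False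
--                 run = 0
--         return out
--
--     # worklist of dirty lines: rescan only lines crossing a changed cell
--     work = [('r', i) for i in range(rows)] + [('c', i) for i in range(cols)]
--     while work:
--         kind, i = work.pop(0)
--         if kind == 'r':
--             new = scan(grid[i])
--             if new != grid[i]:
--                 for c in range(cols):
--                     if new[c] != grid[i][c] and ('c', c) not in work:
--                         work.append(('c', c))
--                 grid[i] = new
--         else:
--             line = [grid[r][i] for r in range(rows)]
--             new = scan(line)
--             if new != line:
--                 for r in range(rows):
--                     if new[r] != grid[r][i]:
--                         if ('r', r) not in work:
--                             work.append(('r', r))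
--                         grid[r][i] = new[r]
--     return grid
-- ===== Notes on version B (the rewrite author's own statement) =====
-- stated objective: alternative
-- what changed: A rescans every row and column of the whole grid in repeated full passes until a pass changes nothing; B keeps a worklist (queue) of dirty lines and rescans only the rows/columns crossing a changed cell, with a single functional fold per line scan instead of A's in-place index loop (asymptotically better worst case, but measured ~1.3x on random inputs, below the 1.5x bar).
import Mathlib
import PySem

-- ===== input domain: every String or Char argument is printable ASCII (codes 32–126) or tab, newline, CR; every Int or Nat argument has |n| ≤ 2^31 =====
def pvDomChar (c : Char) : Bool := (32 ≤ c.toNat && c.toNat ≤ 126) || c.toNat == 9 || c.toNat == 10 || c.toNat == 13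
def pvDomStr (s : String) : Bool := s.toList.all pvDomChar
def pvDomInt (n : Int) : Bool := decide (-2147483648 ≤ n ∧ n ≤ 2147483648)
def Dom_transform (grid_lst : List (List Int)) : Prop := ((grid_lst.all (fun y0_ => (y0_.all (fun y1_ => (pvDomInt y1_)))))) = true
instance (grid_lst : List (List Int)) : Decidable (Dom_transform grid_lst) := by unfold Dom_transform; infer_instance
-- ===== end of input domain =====

-- B replaces A's repeated whole-grid re-scan passes with a worklist that rescans only
-- lines crossing a changed cell (objective: alternative fixpoint strategy).
-- A mutates no caller-visible data (it copies the grid); equivalence is about the return value.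

-- number of 0 cells; used only as the fuel bound that makes both while-loops total
def zerosG (g : List (List Int)) : Nat := (g.map (fun row => row.count 0)).sum

-- the column  [grid[r][c] for r in range(rows)]  (identical comprehension in both Pythons)
def colOf (g : List (List Int)) (c : Nat) (rows : Nat) : List Int :=
  (List.range rows).map (fun r => (g.getD r []).getD c 0)

-- ===== PORT A =====
-- scan_line: the while loop over index i, mutating the ln in place (ln[i] = 2)
def scanAGo (ln : List Int) (i : Nat) (run : Int) (seen : Bool) : List Int :=
  if h : i < ln.length then
    let v := ln[i]
    if v = 2 then scanAGo ln (i+1) (run+1) true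
    else if v = 0 ∧ seen = true then scanAGo (ln.set i 2) (i+1) (run+1) seen
    else if v = 5 then scanAGo ln (i+1) 0 (decide (run ≥ 2))
    else scanAGo ln (i+1) 0 false
  else ln
termination_by ln.length - i
decreasing_by all_goals first | (simp only [List.length_set]; omega) | omega

def scanA (ln : List Int) : List Int := scanAGo ln 0 0 false

-- "for r in range(rows): old = grid[r][:]; scan_line(grid[r]); if grid[r] != old: changed = True"
def passHA (rows : Nat) (st : List (List Int) × Bool) : List (List Int) × Bool :=
  (List.range rows).foldl (fun st r =>
    let old := st.1.getD r []
    let nw := scanA old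
    (st.1.set r nw, st.2 || decide (nw ≠ old))) st

-- "for r in range(rows): grid[r][c] = ln[r]"
def writeColA (g : List (List Int)) (c : Nat) (ln : List Int) (rows : Nat) : List (List Int) :=
  (List.range rows).foldl (fun h r => h.set r ((h.getD r []).set c (ln.getD r 0))) g

-- "for c in range(cols): old_line = …; ln = scan(old_line); if ln != old_line: changed, write back"
def passVA (rows cols : Nat) (st : List (List Int) × Bool) : List (List Int) × Bool :=
  (List.range cols).foldl (fun st c =>
    let old := colOf st.1 c rows
    let nw := scanA old
    if nw = old then st else (writeColA st.1 c nw rows, true)) st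

-- "while changed:" — fueled (fuel = zerosG g + 1 suffices: every changing pass turns a 0 into a 2)
def loopA (rows cols : Nat) : Nat → List (List Int) → List (List Int)
  | 0, g => g
  | fuel+1, g =>
    let st := passVA rows cols (passHA rows (g, false))
    if st.2 then loopA rows cols fuel st.1 else st.1

def transform (grid_lst : List (List Int)) : List (List Int) :=
  match grid_lst with
  | [] => []
  | r0 :: _ =>
    if r0 = [] then []
    else loopA grid_lst.length r0.length (zerosG grid_lst + 1) grid_lst

-- ===== PORT B =====
-- scan: one functional left fold building the output list with the (seen, run) state
def scanB (ln : List Int) : List Int :=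
  (ln.foldl (fun (st : List Int × Bool × Int) v =>
    if v = 2 ∨ (v = 0 ∧ st.2.1 = true) then (st.1 ++ [2], true, st.2.2 + 1)
    else if v = 5 then (st.1 ++ [5], decide (st.2.2 ≥ 2), 0)
    else (st.1 ++ [v], false, 0)) ([], false, 0)).1

-- a worklist entry ('r', i) / ('c', i)
inductive PVLine where
  | row (i : Nat)
  | col (i : Nat)
deriving DecidableEq, Repr

-- the worklist loop: pop the front ln, rescan it, and on change enqueue exactly the
-- not-yet-queued crossing lines of the changed cells (fueled; the stated fuel suffices)
def loopB (rows cols : Nat) : Nat → List (List Int) → List PVLine → List (List Int)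
  | 0, g, _ => g
  | _+1, g, [] => g
  | fuel+1, g, item :: rest =>
    match item with
    | .row i =>
      let old := g.getD i []
      let nw := scanB old
      if nw = old then loopB rows cols fuel g rest
      else
        -- "for c in range(cols): if new[c] != grid[i][c] and ('c', c) not in work: work.append"
        let pushes := (List.range cols).filter
          (fun c => decide (nw.getD c 0 ≠ old.getD c 0) && decide (PVLine.col c ∉ rest))
        loopB rows cols fuel (g.set i nw) (rest ++ pushes.map PVLine.col)
    | .col i =>
      let old := colOf g i rows
      let nw := scanB old
      if nw = old then loopB rows cols fuel g rest
      else
        -- Python interleaves the pushes and the per-cell writes in one loop over r; the write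
        -- to cell (r, i) does not affect the tests of later r', so they are split here
        let pushes := (List.range rows).filter
          (fun r => decide (nw.getD r 0 ≠ (g.getD r []).getD i 0) && decide (PVLine.row r ∉ rest))
        let g' := (List.range rows).foldl (fun h r =>
          if (h.getD r []).getD i 0 ≠ nw.getD r 0
          then h.set r ((h.getD r []).set i (nw.getD r 0)) else h) g
        loopB rows cols fuel g' (rest ++ pushes.map PVLine.row)

def transform_alt (grid_lst : List (List Int)) : List (List Int) :=
  match grid_lst with
  | [] => []
  | r0 :: _ =>
    if r0 = [] then []
    else
      let rows := grid_lst.length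
      let cols := r0.length
      loopB rows cols (rows + cols + (rows + cols + 1) * zerosG grid_lst + 1) grid_lst
        ((List.range rows).map PVLine.row ++ (List.range cols).map PVLine.col)

-- ===== PRECONDITION & SPEC =====
-- Pre_ excludes exactly the grids on which A raises IndexError: a nonempty first row and some
-- row shorter than it (the vertical pass reads grid[r][c] for every c < len(grid[0])).
def Pre_transform (grid_lst : List (List Int)) : Prop :=
  grid_lst = [] ∨ grid_lst.headD [] = [] ∨ ∀ row ∈ grid_lst, (grid_lst.headD []).length ≤ row.length
instance (grid_lst : List (List Int)) : Decidable (Pre_transform grid_lst) := by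
  unfold Pre_transform; infer_instance

def pvWitness_transform : List (List Int) := [[2, 0, 5], [0, 1, 0], [2, 0, 0]]

def Spec_transform (grid_lst : List (List Int)) (out : List (List Int)) : Prop := out = transform_alt grid_lst
instance (grid_lst : List (List Int)) (out : List (List Int)) : Decidable (Spec_transform grid_lst out) := by unfold Spec_transform; infer_instance

-- ===== CLAIM (what is proved, stated in full; the proofs are below) =====
def Claim_equal_transform : Prop := ∀ (grid_lst : List (List Int)), Dom_transform grid_lst → Pre_transform grid_lst → Spec_transform grid_lst (transform grid_lst)

-- ===== LEMMAS AND PROOFS =====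

-- ---------- small list helpers ----------
theorem pvSetGetDSelf (l : List Int) (i : Nat) (d : Int) : l.set i (l.getD i d) = l := by
  rcases Nat.lt_or_ge i l.length with h | h
  · rw [List.getD_eq_getElem _ _ h]; exact List.set_getElem_self h
  · simp [List.set_eq_of_length_le h]

theorem pvGetDSetNe {α : Type} (l : List α) (i j : Nat) (v : α) (d : α) (h : i ≠ j) :
    (l.set i v).getD j d = l.getD j d := by
  simp [List.getD_eq_getElem?_getD, List.getElem?_set_ne h]

theorem pvGetDMapRange {α : Type} [Inhabited α] (f : Nat → α) (n r : Nat) (d : α) (h : r < n) :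
    ((List.range n).map f).getD r d = f r := by
  simp [List.getD_eq_getElem?_getD, h]

theorem pvNeExistsGetD (l l' : List Int) (h : l.length = l'.length) (hne : l ≠ l') :
    ∃ i, i < l.length ∧ l.getD i 0 ≠ l'.getD i 0 := by
  by_contra hc
  push_neg at hc
  apply hne
  apply List.ext_getElem h
  intro i h1 h2
  have := hc i h1
  rw [List.getD_eq_getElem _ _ h1, List.getD_eq_getElem _ _ h2] at this
  exact this

-- ---------- the canonical line scan ----------
def scanGo (seen : Bool) (run : Int) : List Int → List Int
  | [] => []
  | v :: vs =>
    if v = 2 ∨ (v = 0 ∧ seen = true) then 2 :: scanGo true (run + 1) vs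
    else if v = 5 then 5 :: scanGo (decide (run ≥ 2)) 0 vs
    else v :: scanGo false 0 vs

theorem length_scanGo (seen : Bool) (run : Int) (l : List Int) :
    (scanGo seen run l).length = l.length := by
  induction l generalizing seen run with
  | nil => rfl
  | cons v vs ih => simp only [scanGo]; split_ifs <;> simp [ih]

-- A's in-place while loop is the canonical scan
theorem scanAGo_eq (suf : List Int) : ∀ (pre : List Int) (run : Int) (seen : Bool),
    scanAGo (pre ++ suf) pre.length run seen = pre ++ scanGo seen run suf := by
  induction suf with
  | nil =>
    intro pre run seen
    rw [scanAGo]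
    simp [scanGo]
  | cons v vs ih =>
    intro pre run seen
    rw [scanAGo]
    have hlt : pre.length < (pre ++ v :: vs).length := by simp
    have hget : (pre ++ v :: vs)[pre.length]'hlt = v := by
      simp
    rw [dif_pos hlt]
    simp only [hget, scanGo]
    by_cases h2 : v = 2
    · rw [if_pos h2, if_pos (Or.inl h2)]
      have := ih (pre ++ [v]) (run + 1) true
      simpa [h2] using this
    · rw [if_neg h2]
      by_cases h0 : v = 0 ∧ seen = true
      · rw [if_pos h0, if_pos (Or.inr h0)]
        have hset : (pre ++ v :: vs).set pre.length 2 = (pre ++ [(2:Int)]) ++ vs := by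
          rw [List.set_append_right _ _ (Nat.le_refl _)]
          simp
        rw [hset]
        have := ih (pre ++ [(2:Int)]) (run + 1) seen
        have hlen : pre.length + 1 = (pre ++ [(2:Int)]).length := by simp
        rw [hlen, this]
        simp [h0.2]
      · rw [if_neg h0]
        rw [if_neg (show ¬ (v = 2 ∨ (v = 0 ∧ seen = true)) by tauto)]
        by_cases h5 : v = 5
        · rw [if_pos h5, if_pos h5]
          have := ih (pre ++ [v]) 0 (decide (run ≥ 2))
          simpa [h5] using this
        · rw [if_neg h5, if_neg h5]
          have := ih (pre ++ [v]) 0 false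
          simpa using this

theorem scanA_eq (l : List Int) : scanA l = scanGo false 0 l := by
  have := scanAGo_eq l [] 0 false
  simpa [scanA] using this

-- B's fold is the canonical scan
theorem scanB_fold (l : List Int) : ∀ (out : List Int) (seen : Bool) (run : Int),
    (l.foldl (fun (st : List Int × Bool × Int) v =>
      if v = 2 ∨ (v = 0 ∧ st.2.1 = true) then (st.1 ++ [2], true, st.2.2 + 1)
      else if v = 5 then (st.1 ++ [5], decide (st.2.2 ≥ 2), 0)
      else (st.1 ++ [v], false, 0)) (out, seen, run)).1 = out ++ scanGo seen run l := by
  induction l with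
  | nil => intro out seen run; simp [scanGo]
  | cons v vs ih =>
    intro out seen run
    simp only [List.foldl_cons, scanGo]
    split_ifs with h1 h2
    · rw [ih]; simp
    · rw [ih]; simp
    · rw [ih]; simp

theorem scanB_eq (l : List Int) : scanB l = scanGo false 0 l := by
  have := scanB_fold l [] false 0
  simpa [scanB] using this

-- ---------- the 0 ⊑ 2 order ----------
def le2 (a b : Int) : Prop := a = b ∨ (a = 0 ∧ b = 2)
def leL : List Int → List Int → Prop := List.Forall₂ le2
def leG : List (List Int) → List (List Int) → Prop := List.Forall₂ leL

theorem le2_refl (a : Int) : le2 a a := Or.inl rfl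
theorem le2_trans {a b c : Int} (h1 : le2 a b) (h2 : le2 b c) : le2 a c := by
  rcases h1 with h1 | h1 <;> rcases h2 with h2 | h2 <;> simp_all [le2] <;> omega
theorem le2_antisymm {a b : Int} (h1 : le2 a b) (h2 : le2 b a) : a = b := by
  rcases h1 with h1 | h1 <;> rcases h2 with h2 | h2 <;> omega

theorem leL_refl (l : List Int) : leL l l := by
  induction l with
  | nil => exact List.Forall₂.nil
  | cons a l ih => exact List.Forall₂.cons (le2_refl a) ih
theorem leL_trans {a b c : List Int} (h1 : leL a b) (h2 : leL b c) : leL a c := by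
  induction h1 generalizing c with
  | nil => exact h2
  | cons hab h ih => cases h2 with
    | cons hbc h2 => exact List.Forall₂.cons (le2_trans hab hbc) (ih h2)
theorem leL_antisymm {a b : List Int} (h1 : leL a b) (h2 : leL b a) : a = b := by
  induction h1 with
  | nil => rfl
  | cons hab h ih => cases h2 with
    | cons hba h2 => rw [le2_antisymm hab hba, ih h2]

theorem leG_refl (g : List (List Int)) : leG g g := by
  induction g with
  | nil => exact List.Forall₂.nil
  | cons a g ih => exact List.Forall₂.cons (leL_refl a) ih
theorem leG_trans {a b c : List (List Int)} (h1 : leG a b) (h2 : leG b c) : leG a c := by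
  induction h1 generalizing c with
  | nil => exact h2
  | cons hab h ih => cases h2 with
    | cons hbc h2 => exact List.Forall₂.cons (leL_trans hab hbc) (ih h2)
theorem leG_antisymm {a b : List (List Int)} (h1 : leG a b) (h2 : leG b a) : a = b := by
  induction h1 with
  | nil => rfl
  | cons hab h ih => cases h2 with
    | cons hba h2 => rw [leL_antisymm hab hba, ih h2]

theorem leL_getD {l l' : List Int} (h : leL l l') (i : Nat) : le2 (l.getD i 0) (l'.getD i 0) := by
  induction h generalizing i with
  | nil => exact le2_refl 0
  | cons hab h ih => cases i with
    | zero => simpa using hab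
    | succ n => simpa using ih n

theorem leG_getD {g h : List (List Int)} (hle : leG g h) (r : Nat) :
    leL (g.getD r []) (h.getD r []) := by
  induction hle generalizing r with
  | nil => exact leL_refl []
  | cons hab hr ih => cases r with
    | zero => simpa using hab
    | succ n => simpa using ih n

-- ---------- scan is inflationary, monotone, idempotent ----------
theorem scanGo_infl (l : List Int) : ∀ (seen : Bool) (run : Int), leL l (scanGo seen run l) := by
  induction l with
  | nil => intro _ _; exact List.Forall₂.nil
  | cons v vs ih =>
    intro seen run
    simp only [scanGo]
    split_ifs with h1 h2
    · rcases h1 with h1 | h1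
      · exact List.Forall₂.cons (Or.inl h1) (ih true (run+1))
      · exact List.Forall₂.cons (Or.inr ⟨h1.1, rfl⟩) (ih true (run+1))
    · exact List.Forall₂.cons (by rw [h2]; exact le2_refl 5) (ih _ 0)
    · exact List.Forall₂.cons (le2_refl v) (ih false 0)

theorem scanGo_mono {l l' : List Int} (h : leL l l') :
    ∀ (seen seen' : Bool) (run run' : Int), (seen = true → seen' = true) → run ≤ run' → 0 ≤ run →
    leL (scanGo seen run l) (scanGo seen' run' l') := by
  induction h with
  | nil => intro _ _ _ _ _ _ _; exact List.Forall₂.nil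
  | @cons v v' vs vs' hvv htail ih =>
    intro seen seen' run run' hs hr hr0
    rcases hvv with hvv | hvv
    · subst hvv
      simp only [scanGo]
      by_cases hb1 : v = 2 ∨ (v = 0 ∧ seen = true)
      · have hb1' : v = 2 ∨ (v = 0 ∧ seen' = true) := by
          rcases hb1 with h | h
          · exact Or.inl h
          · exact Or.inr ⟨h.1, hs h.2⟩
        rw [if_pos hb1, if_pos hb1']
        exact List.Forall₂.cons (le2_refl 2) (ih true true (run+1) (run'+1) (fun _ => rfl) (by omega) (by omega))
      · rw [if_neg hb1]
        by_cases hb2 : v = 0 ∧ seen' = true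
        · have hv0 : v = 0 := hb2.1
          rw [if_pos (Or.inr hb2)]
          have hv5 : ¬ v = 5 := by omega
          rw [if_neg hv5]
          exact List.Forall₂.cons (Or.inr ⟨hv0, rfl⟩)
            (ih false true 0 (run'+1) (by simp) (by omega) (by omega))
        · have : ¬ (v = 2 ∨ (v = 0 ∧ seen' = true)) := by tauto
          rw [if_neg this]
          by_cases hb5 : v = 5
          · rw [if_pos hb5, if_pos hb5]
            refine List.Forall₂.cons (le2_refl 5) (ih _ _ 0 0 ?_ (by omega) (by omega))
            intro hd
            simp only [decide_eq_true_eq] at hd ⊢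
            omega
          · rw [if_neg hb5, if_neg hb5]
            exact List.Forall₂.cons (le2_refl v) (ih false false 0 0 (fun h => h) (by omega) (by omega))
    · obtain ⟨hv0, hv2⟩ := hvv
      subst hv0; subst hv2
      have hR : scanGo seen' run' (2 :: vs') = 2 :: scanGo true (run' + 1) vs' := by
        simp [scanGo]
      rw [hR]
      by_cases hseen : seen = true
      · have hL : scanGo seen run (0 :: vs) = 2 :: scanGo true (run + 1) vs := by
          simp [scanGo, hseen]
        rw [hL]
        exact List.Forall₂.cons (le2_refl 2) (ih true true (run+1) (run'+1) (fun _ => rfl) (by omega) (by omega))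
      · have hL : scanGo seen run (0 :: vs) = 0 :: scanGo false 0 vs := by
          simp [scanGo, hseen]
        rw [hL]
        exact List.Forall₂.cons (Or.inr ⟨rfl, rfl⟩)
          (ih false true 0 (run'+1) (by simp) (by omega) (by omega))

theorem scanGo_idem (l : List Int) : ∀ (seen : Bool) (run : Int),
    scanGo seen run (scanGo seen run l) = scanGo seen run l := by
  induction l with
  | nil => intro _ _; rfl
  | cons v vs ih =>
    intro seen run
    simp only [scanGo]
    split_ifs with h1 h2
    · have : scanGo seen run (2 :: scanGo true (run + 1) vs)
          = 2 :: scanGo true (run + 1) (scanGo true (run + 1) vs) := by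
        simp [scanGo]
      rw [this, ih true (run+1)]
    · have : scanGo seen run (5 :: scanGo (decide (run ≥ 2)) 0 vs)
          = 5 :: scanGo (decide (run ≥ 2)) 0 (scanGo (decide (run ≥ 2)) 0 vs) := by
        simp [scanGo]
      rw [this, ih _ 0]
    · have hv2 : ¬ v = 2 := fun h => h1 (Or.inl h)
      have hv5 : ¬ v = 5 := h2
      have hvs : ¬ (v = 0 ∧ seen = true) := fun h => h1 (Or.inr h)
      have : scanGo seen run (v :: scanGo false 0 vs)
          = v :: scanGo false 0 (scanGo false 0 vs) := by
        rw [scanGo]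
        rw [if_neg (by tauto), if_neg hv5]
      rw [this, ih false 0]

-- ---------- counting zeros ----------
theorem zeros_le {l l' : List Int} (h : leL l l') : l'.count 0 ≤ l.count 0 := by
  induction h with
  | nil => exact Nat.le_refl _
  | cons hab h ih =>
    rcases hab with hab | hab
    · subst hab; simp only [List.count_cons]; omega
    · simp only [List.count_cons, hab.1, hab.2]; simp; omega

theorem zeros_lt {l l' : List Int} (h : leL l l') (hne : l ≠ l') : l'.count 0 < l.count 0 := by
  induction h with
  | nil => exact absurd rfl hne
  | @cons a b as bs hab h ih =>
    rcases hab with hab | hab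
    · subst hab
      have hne' : as ≠ bs := by intro he; exact hne (by rw [he])
      have := ih hne'
      simp only [List.count_cons]; omega
    · have := zeros_le h
      simp only [List.count_cons, hab.1, hab.2]
      simp; omega

theorem zerosG_le {g h : List (List Int)} (hle : leG g h) : zerosG h ≤ zerosG g := by
  induction hle with
  | nil => exact Nat.le_refl _
  | cons hab hr ih =>
    have := zeros_le hab
    simp only [zerosG, List.map_cons, List.sum_cons] at *
    omega

theorem zerosG_lt {g h : List (List Int)} (hle : leG g h) (hne : h ≠ g) : zerosG h < zerosG g := by
  induction hle with
  | nil => exact absurd rfl hne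
  | @cons a b as bs hab hr ih =>
    by_cases hrow : b = a
    · subst hrow
      have hne' : bs ≠ as := by intro he; exact hne (by rw [he])
      have := ih hne'
      have := zeros_le hab
      simp only [zerosG, List.map_cons, List.sum_cons] at *
      omega
    · have h1 := zeros_lt hab (fun he => hrow he.symm)
      have h2 := zerosG_le hr
      simp only [zerosG, List.map_cons, List.sum_cons] at *
      omega

-- ---------- grid-level line operators ----------
def rowOp (g : List (List Int)) (r : Nat) : List (List Int) :=
  g.set r (scanGo false 0 (g.getD r []))

def colWrite (g : List (List Int)) (c : Nat) (nw : List Int) : List (List Int) :=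
  g.mapIdx (fun r row => row.set c (nw.getD r 0))

def colOp (g : List (List Int)) (c : Nat) : List (List Int) :=
  colWrite g c (scanGo false 0 (colOf g c g.length))

def StepG (cols : Nat) (g h : List (List Int)) : Prop :=
  (∃ r, r < g.length ∧ h = rowOp g r) ∨ (∃ c, c < cols ∧ h = colOp g c)

def ReachG (cols : Nat) : List (List Int) → List (List Int) → Prop :=
  Relation.ReflTransGen (StepG cols)

def rowFixed (g : List (List Int)) (r : Nat) : Prop :=
  scanGo false 0 (g.getD r []) = g.getD r []
def colFixed (g : List (List Int)) (c : Nat) : Prop :=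
  scanGo false 0 (colOf g c g.length) = colOf g c g.length
def FixedG (cols : Nat) (g : List (List Int)) : Prop :=
  (∀ r, r < g.length → rowFixed g r) ∧ (∀ c, c < cols → colFixed g c)

def RowsOK (cols : Nat) (g : List (List Int)) : Prop := ∀ row ∈ g, cols ≤ row.length

-- lengths
theorem length_rowOp (g : List (List Int)) (r : Nat) : (rowOp g r).length = g.length := by
  simp [rowOp]
theorem length_colWrite (g : List (List Int)) (c : Nat) (nw : List Int) :
    (colWrite g c nw).length = g.length := by
  simp [colWrite]
theorem length_colOp (g : List (List Int)) (c : Nat) : (colOp g c).length = g.length := by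
  simp [colOp, length_colWrite]

theorem colOf_getD (g : List (List Int)) (c n r : Nat) (h : r < n) :
    (colOf g c n).getD r 0 = (g.getD r []).getD c 0 := by
  unfold colOf
  exact pvGetDMapRange _ n r 0 h

theorem length_colOf (g : List (List Int)) (c n : Nat) : (colOf g c n).length = n := by
  simp [colOf]

-- RowsOK preservation
theorem rowsOK_set (cols : Nat) {g : List (List Int)} (h : RowsOK cols g) (r : Nat)
    {nw : List Int} (hnw : cols ≤ nw.length) : RowsOK cols (g.set r nw) := by
  intro row hrow
  rcases List.mem_or_eq_of_mem_set hrow with hm | he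
  · exact h row hm
  · rw [he]; exact hnw

theorem rowsOK_rowOp (cols : Nat) {g : List (List Int)} (h : RowsOK cols g) (r : Nat) :
    RowsOK cols (rowOp g r) := by
  rcases Nat.lt_or_ge r g.length with hr | hr
  · apply rowsOK_set cols h
    rw [length_scanGo, List.getD_eq_getElem _ _ hr]
    exact h _ (List.getElem_mem hr)
  · unfold rowOp
    rw [List.set_eq_of_length_le hr]
    exact h

theorem rowsOK_colWrite (cols : Nat) {g : List (List Int)} (h : RowsOK cols g) (c : Nat)
    (nw : List Int) : RowsOK cols (colWrite g c nw) := by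
  intro row hrow
  simp only [colWrite] at hrow
  rw [List.mem_iff_getElem] at hrow
  obtain ⟨i, hi, he⟩ := hrow
  have hi' : i < g.length := by simpa using hi
  rw [List.getElem_mapIdx] at he
  rw [← he, List.length_set]
  exact h _ (List.getElem_mem hi')

theorem rowsOK_colOp (cols : Nat) {g : List (List Int)} (h : RowsOK cols g) (c : Nat) :
    RowsOK cols (colOp g c) := rowsOK_colWrite cols h c _

-- inflation
theorem leG_set_scan (g : List (List Int)) (r : Nat) : leG g (rowOp g r) := by
  unfold rowOp
  induction g generalizing r with
  | nil => simp [leG]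
  | cons a g ih =>
    cases r with
    | zero =>
      simp only [List.set_cons_zero, List.getD_cons_zero]
      exact List.Forall₂.cons (scanGo_infl a false 0) (leG_refl g)
    | succ n =>
      simp only [List.set_cons_succ, List.getD_cons_succ]
      exact List.Forall₂.cons (leL_refl a) (ih n)

theorem leL_set_cell (row : List Int) (c : Nat) (v : Int)
    (h : le2 (row.getD c 0) v) : leL row (row.set c v) := by
  induction row generalizing c with
  | nil => exact List.Forall₂.nil
  | cons a l ih =>
    cases c with
    | zero =>
      simp only [List.set_cons_zero]
      exact List.Forall₂.cons (by simpa using h) (leL_refl l)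
    | succ n =>
      simp only [List.set_cons_succ]
      exact List.Forall₂.cons (le2_refl a) (ih n (by simpa using h))

theorem leG_mapIdx (g : List (List Int)) (f : Nat → List Int → List Int)
    (h : ∀ r row, r < g.length → row = g.getD r [] → leL row (f r row)) :
    leG g (g.mapIdx f) := by
  induction g generalizing f with
  | nil => exact List.Forall₂.nil
  | cons a g ih =>
    rw [List.mapIdx_cons]
    refine List.Forall₂.cons (h 0 a (by simp) (by simp)) (ih _ ?_)
    intro r row hr hrow
    exact h (r+1) row (by simpa using hr) (by simpa using hrow)

theorem leG_colWrite (g : List (List Int)) (c : Nat) (nw : List Int)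
    (hle : leL (colOf g c g.length) nw) : leG g (colWrite g c nw) := by
  apply leG_mapIdx
  intro r row hr hrow
  apply leL_set_cell
  have := leL_getD hle r
  rw [colOf_getD _ _ _ _ hr, ← hrow] at this
  exact this

theorem step_le {cols : Nat} {g h : List (List Int)} (hs : StepG cols g h) : leG g h := by
  rcases hs with ⟨r, _, he⟩ | ⟨c, _, he⟩
  · rw [he]; exact leG_set_scan g r
  · rw [he]; exact leG_colWrite g c _ (scanGo_infl _ false 0)

theorem reach_le {cols : Nat} {g h : List (List Int)} (hs : ReachG cols g h) : leG g h := by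
  induction hs with
  | refl => exact leG_refl g
  | tail _ hstep ih => exact leG_trans ih (step_le hstep)

-- monotonicity of the operators
theorem forall₂_set {g h : List (List Int)} (hle : leG g h) {x y : List Int}
    (hxy : leL x y) : ∀ r, leG (g.set r x) (h.set r y) := by
  induction hle with
  | nil => intro r; exact List.Forall₂.nil
  | @cons a b as bs hab ht ih =>
    intro r
    cases r with
    | zero => exact List.Forall₂.cons hxy ht
    | succ n => exact List.Forall₂.cons hab (ih n)

theorem rowOp_mono {g h : List (List Int)} (hle : leG g h) (r : Nat) :
    leG (rowOp g r) (rowOp h r) := by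
  unfold rowOp
  apply forall₂_set hle
  exact scanGo_mono (leG_getD hle r) false false 0 0 (fun h => h) (by omega) (by omega)

theorem pvForall₂Append {α : Type} {R : α → α → Prop} {a b c d : List α}
    (h1 : List.Forall₂ R a b) (h2 : List.Forall₂ R c d) :
    List.Forall₂ R (a ++ c) (b ++ d) := by
  induction h1 with
  | nil => exact h2
  | cons hx ht ih => exact List.Forall₂.cons hx ih

theorem colOf_mono {g h : List (List Int)} (hle : leG g h) (c : Nat) :
    leL (colOf g c g.length) (colOf h c h.length) := by
  have hlen := List.Forall₂.length_eq hle
  rw [← hlen]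
  unfold colOf
  induction (g.length) with
  | zero => simp [leL]
  | succ n ih =>
    rw [List.range_succ, List.map_append, List.map_append]
    exact pvForall₂Append ih (List.Forall₂.cons (leL_getD (leG_getD hle n) c) List.Forall₂.nil)

theorem forall₂_set_cell {a b : List Int} (hab : leL a b) {v w : Int} (hvw : le2 v w) :
    ∀ c, leL (a.set c v) (b.set c w) := by
  induction hab with
  | nil => intro c; exact List.Forall₂.nil
  | @cons x y xs ys hxy ht ih =>
    intro c
    cases c with
    | zero => exact List.Forall₂.cons hvw ht
    | succ n => exact List.Forall₂.cons hxy (ih n)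

theorem colWrite_mono {g h : List (List Int)} (hle : leG g h) (c : Nat) {nw nw' : List Int}
    (hnw : leL nw nw') : leG (colWrite g c nw) (colWrite h c nw') := by
  unfold colWrite
  induction hle generalizing nw nw' with
  | nil => exact List.Forall₂.nil
  | @cons a b as bs hab ht ih =>
    rw [List.mapIdx_cons, List.mapIdx_cons]
    have hhead : le2 (nw.getD 0 0) (nw'.getD 0 0) := leL_getD hnw 0
    refine List.Forall₂.cons (forall₂_set_cell hab hhead c) ?_
    have htail : leL nw.tail nw'.tail := by
      cases hnw with
      | nil => exact List.Forall₂.nil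
      | cons _ ht2 => exact ht2
    have := ih htail
    have hsh : ∀ (l : List Int) (r : Nat), l.tail.getD r 0 = l.getD (r+1) 0 := by
      intro l r; cases l <;> simp
    simpa [hsh] using this

theorem colOp_mono {g h : List (List Int)} (hle : leG g h) (c : Nat) :
    leG (colOp g c) (colOp h c) := by
  unfold colOp
  exact colWrite_mono hle c
    (scanGo_mono (colOf_mono hle c) false false 0 0 (fun h => h) (by omega) (by omega))

-- fixed grids absorb the operators
theorem pvSetGetDSelf_list (g : List (List Int)) (r : Nat) : g.set r (g.getD r []) = g := by
  rcases Nat.lt_or_ge r g.length with h | h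
  · rw [List.getD_eq_getElem _ _ h]; exact List.set_getElem_self h
  · simp [List.set_eq_of_length_le h]

theorem rowOp_fixed {g : List (List Int)} {r : Nat} (h : rowFixed g r) : rowOp g r = g := by
  unfold rowOp
  rw [h]
  exact pvSetGetDSelf_list g r

theorem colWrite_colOf (g : List (List Int)) (c : Nat) :
    colWrite g c (colOf g c g.length) = g := by
  unfold colWrite
  apply List.ext_getElem (by simp)
  intro i h1 h2
  rw [List.getElem_mapIdx]
  rw [colOf_getD _ _ _ _ h2, List.getD_eq_getElem _ _ h2]
  have : g[i].set c (g[i].getD c 0) = g[i] := pvSetGetDSelf _ c 0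
  simpa using this

theorem colOp_fixed {g : List (List Int)} {c : Nat} (h : colFixed g c) : colOp g c = g := by
  unfold colOp
  rw [h]
  exact colWrite_colOf g c

-- any reachable grid is dominated by any reachable fixed grid
theorem reach_le_fix {cols : Nat} {g h f : List (List Int)} (hr : ReachG cols g h)
    (hgf : leG g f) (hf : FixedG cols f) : leG h f := by
  induction hr using Relation.ReflTransGen.head_induction_on with
  | refl => exact hgf
  | head hstep _ ih =>
    apply ih
    rcases hstep with ⟨r, hrlt, he⟩ | ⟨c, hclt, he⟩
    · rw [he]
      have : rowOp f r = f := rowOp_fixed (hf.1 r (by rw [← (List.Forall₂.length_eq hgf)]; exact hrlt))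
      rw [← this]
      exact rowOp_mono hgf r
    · rw [he]
      have : colOp f c = f := colOp_fixed (hf.2 c hclt)
      rw [← this]
      exact colOp_mono hgf c

theorem fix_unique {cols : Nat} {g a b : List (List Int)}
    (ha : ReachG cols g a) (hfa : FixedG cols a)
    (hb : ReachG cols g b) (hfb : FixedG cols b) : a = b :=
  leG_antisymm (reach_le_fix ha (reach_le hb) hfb) (reach_le_fix hb (reach_le ha) hfa)

-- generic getD-of-set lemma (any element type)
theorem pvGetDSetSelfG {α : Type} (l : List α) (i : Nat) (v d : α) (h : i < l.length) :
    (l.set i v).getD i d = v := by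
  simp [List.getD_eq_getElem?_getD, h]

-- ---------- A's passes produce reachable grids; a false flag certifies fixedness ----------
theorem passH_fold (cols : Nat) (L : List Nat) : ∀ (g : List (List Int)) (ch : Bool),
    (∀ r ∈ L, r < g.length) → RowsOK cols g →
    (ReachG cols g (L.foldl (fun st r =>
        let old := st.1.getD r []
        let nw := scanA old
        (st.1.set r nw, st.2 || decide (nw ≠ old))) (g, ch)).1 ∧
     (L.foldl (fun st r =>
        let old := st.1.getD r []
        let nw := scanA old
        (st.1.set r nw, st.2 || decide (nw ≠ old))) (g, ch)).1.length = g.length ∧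
     RowsOK cols (L.foldl (fun st r =>
        let old := st.1.getD r []
        let nw := scanA old
        (st.1.set r nw, st.2 || decide (nw ≠ old))) (g, ch)).1 ∧
     zerosG (L.foldl (fun st r =>
        let old := st.1.getD r []
        let nw := scanA old
        (st.1.set r nw, st.2 || decide (nw ≠ old))) (g, ch)).1 ≤ zerosG g ∧
     ((L.foldl (fun st r =>
        let old := st.1.getD r []
        let nw := scanA old
        (st.1.set r nw, st.2 || decide (nw ≠ old))) (g, ch)).2 = false →
        ch = false ∧ (L.foldl (fun st r =>
        let old := st.1.getD r []
        let nw := scanA old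
        (st.1.set r nw, st.2 || decide (nw ≠ old))) (g, ch)).1 = g ∧ ∀ r ∈ L, rowFixed g r) ∧
     ((L.foldl (fun st r =>
        let old := st.1.getD r []
        let nw := scanA old
        (st.1.set r nw, st.2 || decide (nw ≠ old))) (g, ch)).2 = true →
        ch = true ∨ zerosG (L.foldl (fun st r =>
        let old := st.1.getD r []
        let nw := scanA old
        (st.1.set r nw, st.2 || decide (nw ≠ old))) (g, ch)).1 < zerosG g)) := by
  induction L with
  | nil =>
    intro g ch _ hok
    refine ⟨Relation.ReflTransGen.refl, rfl, hok, Nat.le_refl _, ?_, ?_⟩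
    · intro hf; exact ⟨hf, rfl, by simp⟩
    · intro ht; exact Or.inl ht
  | cons r L ih =>
    intro g ch hmem hok
    have hr : r < g.length := hmem r (by simp)
    simp only [List.foldl_cons]
    by_cases he : scanA (g.getD r []) = g.getD r []
    · rw [he]
      have hset : g.set r (g.getD r []) = g := pvSetGetDSelf_list g r
      rw [hset]
      have hdec : decide (g.getD r [] ≠ g.getD r []) = false := by simp
      rw [hdec, Bool.or_false]
      obtain ⟨h1, h2, h3, h4, h5, h6⟩ := ih g ch (fun x hx => hmem x (by simp [hx])) hok
      refine ⟨h1, h2, h3, h4, ?_, h6⟩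
      intro hf
      obtain ⟨hc, hg, hfix⟩ := h5 hf
      refine ⟨hc, hg, ?_⟩
      intro x hx
      rcases List.mem_cons.mp hx with hx | hx
      · subst hx
        unfold rowFixed
        rw [← scanA_eq]
        exact he
      · exact hfix x hx
    · have hnw : scanA (g.getD r []) = scanGo false 0 (g.getD r []) := scanA_eq _
      have hrow : g.set r (scanA (g.getD r [])) = rowOp g r := by
        rw [hnw]; rfl
      have hstep : StepG cols g (rowOp g r) := Or.inl ⟨r, hr, rfl⟩
      have hle : leG g (rowOp g r) := step_le hstep
      have hne : rowOp g r ≠ g := by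
        intro heq
        apply he
        have h1 : (rowOp g r).getD r [] = scanGo false 0 (g.getD r []) := by
          unfold rowOp
          exact pvGetDSetSelfG g r _ [] hr
        rw [heq] at h1
        rw [hnw, ← h1]
      have hzlt : zerosG (rowOp g r) < zerosG g := zerosG_lt hle hne
      have hdec : decide (scanA (g.getD r []) ≠ g.getD r []) = true := decide_eq_true he
      rw [hrow, hdec, Bool.or_true]
      have hlen : (rowOp g r).length = g.length := length_rowOp g r
      obtain ⟨h1, h2, h3, h4, h5, h6⟩ := ih (rowOp g r) true
        (fun x hx => by rw [hlen]; exact hmem x (by simp [hx])) (rowsOK_rowOp cols hok r)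
      refine ⟨Relation.ReflTransGen.head hstep h1, h2.trans hlen, h3,
        le_trans h4 (le_of_lt hzlt) |>.trans (Nat.le_refl _), ?_, ?_⟩
      · intro hf
        exact absurd (h5 hf).1 (by simp)
      · intro _
        exact Or.inr (lt_of_le_of_lt h4 hzlt)

theorem foldl_set_eq_mapIdx (f : Nat → List Int → List Int) :
    ∀ (k : Nat) (g : List (List Int)),
    (List.range k).foldl (fun h r => h.set r (f r (h.getD r []))) g
      = g.mapIdx (fun r row => if r < k then f r row else row) := by
  intro k
  induction k with
  | zero =>
    intro g
    apply List.ext_getElem (by simp)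
    intro i h1 h2
    simp [List.getElem_mapIdx]
  | succ k ih =>
    intro g
    rw [List.range_succ, List.foldl_append, ih]
    simp only [List.foldl_cons, List.foldl_nil]
    rcases Nat.lt_or_ge k g.length with hk | hk
    · have hGd : (List.mapIdx (fun r row => if r < k then f r row else row) g).getD k [] = g[k] := by
        rw [List.getD_eq_getElem _ _ (by simpa using hk), List.getElem_mapIdx]
        simp
      rw [hGd]
      apply List.ext_getElem (by simp)
      intro i hi1 hi2
      have hig : i < g.length := by simpa using hi2
      rw [List.getElem_set]
      by_cases hik : k = i
      · subst hik
        rw [if_pos rfl, List.getElem_mapIdx]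
        rw [if_pos (by omega)]
      · rw [if_neg hik, List.getElem_mapIdx, List.getElem_mapIdx]
        by_cases hlt : i < k
        · rw [if_pos hlt, if_pos (by omega)]
        · rw [if_neg hlt, if_neg (by omega)]
    · rw [List.set_eq_of_length_le (by simpa using hk)]
      apply List.ext_getElem (by simp)
      intro i hi1 hi2
      have hig : i < g.length := by simpa using hi1
      rw [List.getElem_mapIdx, List.getElem_mapIdx]
      rw [if_pos (by omega), if_pos (by omega)]

theorem writeColA_eq (g : List (List Int)) (c : Nat) (nw : List Int) :
    writeColA g c nw g.length = colWrite g c nw := by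
  unfold writeColA
  rw [foldl_set_eq_mapIdx (fun r row => row.set c (nw.getD r 0)) g.length g]
  apply List.ext_getElem (by simp [colWrite])
  intro i h1 h2
  rw [List.getElem_mapIdx]
  unfold colWrite
  rw [List.getElem_mapIdx]
  rw [if_pos (by simpa using h1)]

theorem passV_fold (rows cols : Nat) (L : List Nat) : ∀ (g : List (List Int)) (ch : Bool),
    g.length = rows → (∀ c ∈ L, c < cols) → RowsOK cols g →
    (ReachG cols g (L.foldl (fun st c =>
        let old := colOf st.1 c rows
        let nw := scanA old
        if nw = old then st else (writeColA st.1 c nw rows, true)) (g, ch)).1 ∧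
     (L.foldl (fun st c =>
        let old := colOf st.1 c rows
        let nw := scanA old
        if nw = old then st else (writeColA st.1 c nw rows, true)) (g, ch)).1.length = g.length ∧
     RowsOK cols (L.foldl (fun st c =>
        let old := colOf st.1 c rows
        let nw := scanA old
        if nw = old then st else (writeColA st.1 c nw rows, true)) (g, ch)).1 ∧
     zerosG (L.foldl (fun st c =>
        let old := colOf st.1 c rows
        let nw := scanA old
        if nw = old then st else (writeColA st.1 c nw rows, true)) (g, ch)).1 ≤ zerosG g ∧
     ((L.foldl (fun st c =>
        let old := colOf st.1 c rows
        let nw := scanA old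
        if nw = old then st else (writeColA st.1 c nw rows, true)) (g, ch)).2 = false →
        ch = false ∧ (L.foldl (fun st c =>
        let old := colOf st.1 c rows
        let nw := scanA old
        if nw = old then st else (writeColA st.1 c nw rows, true)) (g, ch)).1 = g ∧
        ∀ c ∈ L, colFixed g c) ∧
     ((L.foldl (fun st c =>
        let old := colOf st.1 c rows
        let nw := scanA old
        if nw = old then st else (writeColA st.1 c nw rows, true)) (g, ch)).2 = true →
        ch = true ∨ zerosG (L.foldl (fun st c =>
        let old := colOf st.1 c rows
        let nw := scanA old
        if nw = old then st else (writeColA st.1 c nw rows, true)) (g, ch)).1 < zerosG g)) := by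
  induction L with
  | nil =>
    intro g ch _ _ hok
    refine ⟨Relation.ReflTransGen.refl, rfl, hok, Nat.le_refl _, ?_, ?_⟩
    · intro hf; exact ⟨hf, rfl, by simp⟩
    · intro ht; exact Or.inl ht
  | cons c L ih =>
    intro g ch hglen hmem hok
    have hc : c < cols := hmem c (by simp)
    simp only [List.foldl_cons]
    by_cases he : scanA (colOf g c rows) = colOf g c rows
    · rw [if_pos he]
      obtain ⟨h1, h2, h3, h4, h5, h6⟩ := ih g ch hglen (fun x hx => hmem x (by simp [hx])) hok
      refine ⟨h1, h2, h3, h4, ?_, h6⟩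
      intro hf
      obtain ⟨hcf, hg, hfix⟩ := h5 hf
      refine ⟨hcf, hg, ?_⟩
      intro x hx
      rcases List.mem_cons.mp hx with hx | hx
      · subst hx
        unfold colFixed
        rw [hglen, ← scanA_eq]
        exact he
      · exact hfix x hx
    · rw [if_neg he]
      have hnw : scanA (colOf g c rows) = scanGo false 0 (colOf g c rows) := scanA_eq _
      have hwc : writeColA g c (scanA (colOf g c rows)) rows = colOp g c := by
        rw [hnw]
        unfold colOp
        rw [← hglen]
        exact writeColA_eq g c _
      have hstep : StepG cols g (colOp g c) := Or.inr ⟨c, hc, rfl⟩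
      have hle : leG g (colOp g c) := step_le hstep
      have hne : colOp g c ≠ g := by
        intro heq
        apply he
        rw [hnw]
        -- some entry of the scanned column differs; that cell changes in colOp g c
        by_contra hne2
        obtain ⟨i, hilt, hid⟩ := pvNeExistsGetD _ _
          (by rw [length_scanGo]) hne2
        rw [length_scanGo, length_colOf] at hilt
        have hirow : i < g.length := by omega
        have hcell : (colOp g c).getD i [] = (g.getD i []).set c ((scanGo false 0 (colOf g c g.length)).getD i 0) := by
          unfold colOp colWrite
          rw [List.getD_eq_getElem _ _ (by simpa using hirow), List.getElem_mapIdx]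
          rw [List.getD_eq_getElem _ _ hirow]
        have hclen : c < (g.getD i []).length := by
          rw [List.getD_eq_getElem _ _ hirow]
          exact Nat.lt_of_lt_of_le hc (hok _ (List.getElem_mem hirow))
        have hv : ((colOp g c).getD i []).getD c 0 = (scanGo false 0 (colOf g c g.length)).getD i 0 := by
          rw [hcell]
          exact pvGetDSetSelfG _ c _ 0 hclen
        rw [heq] at hv
        rw [← colOf_getD g c rows i (by omega)] at hv
        rw [hglen] at hv
        exact hid hv.symm
      have hzlt : zerosG (colOp g c) < zerosG g := zerosG_lt hle hne
      have hlen : (colOp g c).length = g.length := length_colOp g c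
      rw [hwc]
      obtain ⟨h1, h2, h3, h4, h5, h6⟩ := ih (colOp g c) true (by rw [hlen, hglen])
        (fun x hx => hmem x (by simp [hx])) (rowsOK_colOp cols hok c)
      refine ⟨Relation.ReflTransGen.head hstep h1, h2.trans hlen, h3,
        le_trans h4 (le_of_lt hzlt), ?_, ?_⟩
      · intro hf
        exact absurd (h5 hf).1 (by simp)
      · intro _
        exact Or.inr (lt_of_le_of_lt h4 hzlt)

theorem loopA_inv (rows cols : Nat) : ∀ (fuel : Nat) (g : List (List Int)),
    zerosG g + 1 ≤ fuel → g.length = rows → RowsOK cols g →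
    ReachG cols g (loopA rows cols fuel g) ∧ FixedG cols (loopA rows cols fuel g) := by
  intro fuel
  induction fuel with
  | zero => intro g hz _ _; omega
  | succ fuel ih =>
    intro g hz hglen hok
    obtain ⟨a1, a2, a3, a4, a5, a6⟩ := passH_fold cols (List.range rows) g false
      (fun r hr => by rw [hglen]; simpa using hr) hok
    set st1 := (List.range rows).foldl (fun st r =>
        let old := st.1.getD r []
        let nw := scanA old
        (st.1.set r nw, st.2 || decide (nw ≠ old))) (g, false) with hst1
    obtain ⟨b1, b2, b3, b4, b5, b6⟩ := passV_fold rows cols (List.range cols) st1.1 st1.2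
      (by omega) (fun c hc => by simpa using hc) a3
    set st2 := (List.range cols).foldl (fun st c =>
        let old := colOf st.1 c rows
        let nw := scanA old
        if nw = old then st else (writeColA st.1 c nw rows, true)) (st1.1, st1.2) with hst2
    have hloopA : loopA rows cols (fuel + 1) g = if st2.2 then loopA rows cols fuel st2.1 else st2.1 := by
      rw [loopA]
      rfl
    have hreach12 : ReachG cols g st2.1 := Relation.ReflTransGen.trans a1 b1
    by_cases hflag : st2.2 = true
    · rw [hloopA, if_pos hflag]
      have hzlt : zerosG st2.1 < zerosG g := by
        rcases b6 hflag with hb | hb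
        · rcases a6 hb with ha | ha
          · exact absurd ha (by simp)
          · exact lt_of_le_of_lt b4 ha
        · exact lt_of_lt_of_le hb a4
      obtain ⟨c1, c2⟩ := ih st2.1 (by omega) (by omega) b3
      exact ⟨Relation.ReflTransGen.trans hreach12 c1, c2⟩
    · rw [hloopA, if_neg hflag]
      have hflag' : st2.2 = false := by simpa using hflag
      obtain ⟨hb0, hbeq, hbfix⟩ := b5 hflag'
      obtain ⟨_, haeq, hafix⟩ := a5 hb0
      rw [hbeq, haeq]
      refine ⟨Relation.ReflTransGen.refl, ?_, ?_⟩
      · intro r hrl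
        exact hafix r (by rw [← hglen]; simpa using hrl)
      · intro c hcl
        have := hbfix c (by simpa using hcl)
        rw [haeq] at this
        exact this

-- ---------- B's worklist loop ----------
theorem pvSetValSelf (l : List Int) (i : Nat) (v : Int) (h : l.getD i 0 = v) :
    l.set i v = l := by
  rw [← h]
  exact pvSetGetDSelf l i 0

def WFStack (rows cols : Nat) (stack : List PVLine) : Prop :=
  ∀ it ∈ stack, (∀ r, it = PVLine.row r → r < rows) ∧ (∀ c, it = PVLine.col c → c < cols)

def InvB (rows cols : Nat) (g : List (List Int)) (stack : List PVLine) : Prop :=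
  (∀ r, r < rows → PVLine.row r ∉ stack → rowFixed g r) ∧
  (∀ c, c < cols → PVLine.col c ∉ stack → colFixed g c)

-- B's per-cell conditional write-back of a column is colWrite
theorem loopB_colfold (g : List (List Int)) (i : Nat) (nw : List Int) :
    (List.range g.length).foldl (fun h r =>
      if (h.getD r []).getD i 0 ≠ nw.getD r 0
      then h.set r ((h.getD r []).set i (nw.getD r 0)) else h) g = colWrite g i nw := by
  have hfun : (fun (h : List (List Int)) (r : Nat) =>
      if (h.getD r []).getD i 0 ≠ nw.getD r 0
      then h.set r ((h.getD r []).set i (nw.getD r 0)) else h)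
      = (fun (h : List (List Int)) (r : Nat) => h.set r
          ((fun (r : Nat) (row : List Int) =>
            if row.getD i 0 ≠ nw.getD r 0 then row.set i (nw.getD r 0) else row) r (h.getD r []))) := by
    funext h r
    by_cases hc : (h.getD r []).getD i 0 ≠ nw.getD r 0
    · simp only [if_pos hc]
    · simp only [if_neg hc]
      exact (pvSetGetDSelf_list h r).symm
  rw [hfun, foldl_set_eq_mapIdx
    (fun r row => if row.getD i 0 ≠ nw.getD r 0 then row.set i (nw.getD r 0) else row) g.length g]
  apply List.ext_getElem (by simp [colWrite])
  intro r h1 h2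
  rw [List.getElem_mapIdx]
  unfold colWrite
  rw [List.getElem_mapIdx]
  rw [if_pos (by simpa using h1)]
  by_cases hc : (g[r]'(by simpa using h1)).getD i 0 ≠ nw.getD r 0
  · rw [if_pos hc]
  · rw [if_neg hc]
    exact (pvSetValSelf _ _ _ (not_ne_iff.mp hc)).symm

-- after writing a scanned column back, that column reads exactly the written line
theorem colOf_colWrite_self (cols : Nat) (g : List (List Int)) (i : Nat) (nw : List Int)
    (hlen : nw.length = g.length) (hok : RowsOK cols g) (hi : i < cols) :
    colOf (colWrite g i nw) i (colWrite g i nw).length = nw := by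
  rw [length_colWrite]
  apply List.ext_getElem (by rw [length_colOf, hlen])
  intro r h1 h2
  have hr : r < g.length := by
    have := h1; rw [length_colOf] at this; exact this
  simp only [colOf, List.getElem_map, List.getElem_range]
  have hrowr : (colWrite g i nw).getD r [] = (g[r]'hr).set i (nw.getD r 0) := by
    unfold colWrite
    rw [List.getD_eq_getElem _ _ (by simpa using hr), List.getElem_mapIdx]
  have hclen : i < (g[r]'hr).length := Nat.lt_of_lt_of_le hi (hok _ (List.getElem_mem hr))
  rw [hrowr, pvGetDSetSelfG _ _ _ _ hclen, List.getD_eq_getElem _ _ h2]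

-- a column whose cell is untouched by a row replacement is unchanged
theorem colOf_set_unchanged (g : List (List Int)) (i : Nat) (nw : List Int) (c n : Nat)
    (h : nw.getD c 0 = (g.getD i []).getD c 0) :
    colOf (g.set i nw) c n = colOf g c n := by
  unfold colOf
  apply List.map_congr_left
  intro r _
  by_cases hri : r = i
  · subst hri
    rcases Nat.lt_or_ge r g.length with hr | hr
    · rw [pvGetDSetSelfG g r nw [] hr, h]
    · rw [List.set_eq_of_length_le hr]
  · rw [pvGetDSetNe g i r nw [] (fun he => hri he.symm)]

-- a column other than the written one is unchanged by colWrite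
theorem colOf_colWrite_ne (g : List (List Int)) (i : Nat) (nw : List Int) (c n : Nat)
    (hci : c ≠ i) : colOf (colWrite g i nw) c n = colOf g c n := by
  unfold colOf
  apply List.map_congr_left
  intro r _
  rcases Nat.lt_or_ge r g.length with hr | hr
  · have : (colWrite g i nw).getD r [] = (g[r]'hr).set i (nw.getD r 0) := by
      unfold colWrite
      rw [List.getD_eq_getElem _ _ (by simpa using hr), List.getElem_mapIdx]
    rw [this, pvGetDSetNe _ i c _ 0 (fun he => hci he.symm)]
    rw [List.getD_eq_getElem _ _ hr]
  · have h1 : (colWrite g i nw).getD r [] = [] := by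
      rw [List.getD_eq_default]
      simpa [colWrite] using hr
    have h2 : g.getD r [] = [] := by
      rw [List.getD_eq_default]
      simpa using hr
    rw [h1, h2]

-- a row whose cell is untouched by a column write-back is unchanged
theorem row_colWrite_unchanged (g : List (List Int)) (i : Nat) (nw : List Int) (r : Nat)
    (h : (g.getD r []).getD i 0 = nw.getD r 0) :
    (colWrite g i nw).getD r [] = g.getD r [] := by
  rcases Nat.lt_or_ge r g.length with hr | hr
  · have h1 : (colWrite g i nw).getD r [] = (g[r]'hr).set i (nw.getD r 0) := by
      unfold colWrite
      rw [List.getD_eq_getElem _ _ (by simpa using hr), List.getElem_mapIdx]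
    rw [h1, List.getD_eq_getElem _ _ hr]
    apply pvSetValSelf
    rw [← List.getD_eq_getElem _ _ hr]
    exact h
  · have h1 : (colWrite g i nw).getD r [] = [] := by
      rw [List.getD_eq_default]
      simpa [colWrite] using hr
    have h2 : g.getD r [] = [] := by
      rw [List.getD_eq_default]
      simpa using hr
    rw [h1, h2]

theorem loopB_inv (rows cols : Nat) : ∀ (fuel : Nat) (g : List (List Int)) (stack : List PVLine),
    stack.length + (rows + cols + 1) * zerosG g + 1 ≤ fuel →
    g.length = rows → RowsOK cols g → WFStack rows cols stack → InvB rows cols g stack →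
    ReachG cols g (loopB rows cols fuel g stack) ∧ FixedG cols (loopB rows cols fuel g stack) := by
  intro fuel
  induction fuel with
  | zero => intro g stack h _ _ _ _; omega
  | succ fuel ih =>
    intro g stack hfuel hglen hok hwf hinv
    match stack with
    | [] =>
      simp only [loopB]
      refine ⟨Relation.ReflTransGen.refl, ?_, ?_⟩
      · intro r hr
        exact hinv.1 r (by omega) (by simp)
      · intro c hc
        exact hinv.2 c hc (by simp)
    | PVLine.row i :: rest =>
      have hi : i < rows := (hwf _ (by simp)).1 i rfl
      have hig : i < g.length := by omega
      simp only [loopB]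
      by_cases he : scanB (g.getD i []) = g.getD i []
      · rw [if_pos he]
        refine ih g rest (by simp at hfuel ⊢; omega) hglen hok
          (fun it hit => hwf it (by simp [hit])) ⟨?_, ?_⟩
        · intro r hr hnr
          by_cases hri : r = i
          · subst hri
            unfold rowFixed
            rw [← scanB_eq]
            exact he
          · refine hinv.1 r hr ?_
            intro hmem
            rcases List.mem_cons.mp hmem with hm | hm
            · exact hri (by injection hm)
            · exact hnr hm
        · intro c hc hnc
          refine hinv.2 c hc ?_
          intro hmem
          rcases List.mem_cons.mp hmem with hm | hm
          · exact PVLine.noConfusion hm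
          · exact hnc hm
      · rw [if_neg he]
        have hnw : scanB (g.getD i []) = scanGo false 0 (g.getD i []) := scanB_eq _
        have hrow : g.set i (scanB (g.getD i [])) = rowOp g i := by
          rw [hnw]; rfl
        have hstep : StepG cols g (rowOp g i) := Or.inl ⟨i, hig, rfl⟩
        have hle : leG g (rowOp g i) := step_le hstep
        have hne : rowOp g i ≠ g := by
          intro heq
          apply he
          have h1 : (rowOp g i).getD i [] = scanGo false 0 (g.getD i []) := by
            unfold rowOp
            exact pvGetDSetSelfG g i _ [] hig
          rw [heq] at h1
          rw [hnw, ← h1]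
        have hzlt : zerosG (rowOp g i) < zerosG g := zerosG_lt hle hne
        have hplen : ((List.range cols).filter (fun c =>
            decide ((scanB (g.getD i [])).getD c 0 ≠ (g.getD i []).getD c 0) &&
            decide (PVLine.col c ∉ rest))).length ≤ cols := by
          exact le_trans (List.length_filter_le _ _) (by simp)
        rw [hrow]
        have hfuel' : (rest ++ ((List.range cols).filter (fun c =>
              decide ((scanB (g.getD i [])).getD c 0 ≠ (g.getD i []).getD c 0) &&
              decide (PVLine.col c ∉ rest))).map PVLine.col).length
            + (rows + cols + 1) * zerosG (rowOp g i) + 1 ≤ fuel := by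
          rw [List.length_append, List.length_map]
          have hmul : (rows + cols + 1) * zerosG (rowOp g i) + (rows + cols + 1)
              ≤ (rows + cols + 1) * zerosG g := by
            rw [← Nat.mul_succ]
            exact Nat.mul_le_mul_left _ (by omega)
          simp only [List.length_cons] at hfuel
          omega
        refine (ih (rowOp g i) _ hfuel' (by rw [length_rowOp, hglen])
          (rowsOK_rowOp cols hok i) ?_ ⟨?_, ?_⟩).imp
          (fun h => Relation.ReflTransGen.head hstep h) id
        · intro it hit
          rcases List.mem_append.mp hit with hm | hm
          · exact hwf it (by simp [hm])
          · obtain ⟨c, hc, he'⟩ := List.mem_map.mp hm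
            refine ⟨fun r hr => PVLine.noConfusion (he' ▸ hr), fun c' hc' => ?_⟩
            have : c = c' := by rw [← he'] at hc'; injection hc'
            subst this
            exact List.mem_range.mp (List.mem_filter.mp hc).1
        · -- rows stay fixed
          intro r hr hnr
          by_cases hri : r = i
          · subst hri
            unfold rowFixed rowOp
            rw [pvGetDSetSelfG g r _ [] hig]
            exact scanGo_idem _ false 0
          · unfold rowFixed
            rw [show (rowOp g i).getD r [] = g.getD r [] from
              pvGetDSetNe g i r _ [] (fun he' => hri he'.symm)]
            refine hinv.1 r hr ?_
            intro hmem
            rcases List.mem_cons.mp hmem with hm | hm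
            · exact hri (by injection hm)
            · exact hnr (List.mem_append_left _ hm)
        · -- columns untouched by the changed cells stay fixed
          intro c hc hnc
          have hcrest : PVLine.col c ∉ rest := fun hm => hnc (List.mem_append_left _ hm)
          have hsame : (scanB (g.getD i [])).getD c 0 = (g.getD i []).getD c 0 := by
            by_contra hd
            apply hnc
            apply List.mem_append_right
            apply List.mem_map.mpr
            refine ⟨c, List.mem_filter.mpr ⟨List.mem_range.mpr hc, ?_⟩, rfl⟩
            rw [Bool.and_eq_true]; exact ⟨decide_eq_true hd, decide_eq_true hcrest⟩
          have hcol : colOf (rowOp g i) c (rowOp g i).length = colOf g c g.length := by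
            rw [length_rowOp]
            unfold rowOp
            apply colOf_set_unchanged
            rw [← hnw]
            exact hsame
          unfold colFixed
          rw [hcol]
          exact hinv.2 c hc (fun hm => hnc (by
            rcases List.mem_cons.mp hm with hm' | hm'
            · exact absurd hm' (by simp)
            · exact List.mem_append_left _ hm'))
    | PVLine.col i :: rest =>
      have hi : i < cols := (hwf _ (by simp)).2 i rfl
      simp only [loopB]
      by_cases he : scanB (colOf g i rows) = colOf g i rows
      · rw [if_pos he]
        refine ih g rest (by simp at hfuel ⊢; omega) hglen hok
          (fun it hit => hwf it (by simp [hit])) ⟨?_, ?_⟩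
        · intro r hr hnr
          refine hinv.1 r hr ?_
          intro hmem
          rcases List.mem_cons.mp hmem with hm | hm
          · exact PVLine.noConfusion hm
          · exact hnr hm
        · intro c hc hnc
          by_cases hci : c = i
          · subst hci
            unfold colFixed
            rw [hglen, ← scanB_eq]
            exact he
          · refine hinv.2 c hc ?_
            intro hmem
            rcases List.mem_cons.mp hmem with hm | hm
            · exact hci (by injection hm)
            · exact hnc hm
      · rw [if_neg he]
        have hnw : scanB (colOf g i rows) = scanGo false 0 (colOf g i rows) := scanB_eq _
        have hfold : (List.range rows).foldl (fun h r =>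
            if (h.getD r []).getD i 0 ≠ (scanB (colOf g i rows)).getD r 0
            then h.set r ((h.getD r []).set i ((scanB (colOf g i rows)).getD r 0)) else h) g
            = colWrite g i (scanB (colOf g i rows)) := by
          rw [← hglen]
          exact loopB_colfold g i _
        have hcolop : colWrite g i (scanB (colOf g i rows)) = colOp g i := by
          rw [hnw]
          unfold colOp
          rw [← hglen]
        have hstep : StepG cols g (colOp g i) := Or.inr ⟨i, hi, rfl⟩
        have hle : leG g (colOp g i) := step_le hstep
        have hne : colOp g i ≠ g := by
          intro heq
          apply he
          rw [hnw]
          by_contra hne2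
          obtain ⟨j, hjlt, hjd⟩ := pvNeExistsGetD _ _ (by rw [length_scanGo]) hne2
          rw [length_scanGo, length_colOf] at hjlt
          have hjrow : j < g.length := by omega
          have hcell : (colOp g i).getD j [] =
              (g.getD j []).set i ((scanGo false 0 (colOf g i g.length)).getD j 0) := by
            unfold colOp colWrite
            rw [List.getD_eq_getElem _ _ (by simpa using hjrow), List.getElem_mapIdx]
            rw [List.getD_eq_getElem _ _ hjrow]
          have hclen : i < (g.getD j []).length := by
            rw [List.getD_eq_getElem _ _ hjrow]
            exact Nat.lt_of_lt_of_le hi (hok _ (List.getElem_mem hjrow))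
          have hv : ((colOp g i).getD j []).getD i 0 =
              (scanGo false 0 (colOf g i g.length)).getD j 0 := by
            rw [hcell]
            exact pvGetDSetSelfG _ i _ 0 hclen
          rw [heq] at hv
          rw [← colOf_getD g i rows j (by omega)] at hv
          rw [hglen] at hv
          exact hjd hv.symm
        have hzlt : zerosG (colOp g i) < zerosG g := zerosG_lt hle hne
        rw [hfold, hcolop]
        have hplen : ((List.range rows).filter (fun r =>
            decide ((scanB (colOf g i rows)).getD r 0 ≠ (g.getD r []).getD i 0) &&
            decide (PVLine.row r ∉ rest))).length ≤ rows := by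
          exact le_trans (List.length_filter_le _ _) (by simp)
        have hfuel' : (rest ++ ((List.range rows).filter (fun r =>
              decide ((scanB (colOf g i rows)).getD r 0 ≠ (g.getD r []).getD i 0) &&
              decide (PVLine.row r ∉ rest))).map PVLine.row).length
            + (rows + cols + 1) * zerosG (colOp g i) + 1 ≤ fuel := by
          rw [List.length_append, List.length_map]
          have hmul : (rows + cols + 1) * zerosG (colOp g i) + (rows + cols + 1)
              ≤ (rows + cols + 1) * zerosG g := by
            rw [← Nat.mul_succ]
            exact Nat.mul_le_mul_left _ (by omega)
          simp only [List.length_cons] at hfuel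
          omega
        refine (ih (colOp g i) _ hfuel' (by rw [length_colOp, hglen])
          (rowsOK_colOp cols hok i) ?_ ⟨?_, ?_⟩).imp
          (fun h => Relation.ReflTransGen.head hstep h) id
        · intro it hit
          rcases List.mem_append.mp hit with hm | hm
          · exact hwf it (by simp [hm])
          · obtain ⟨r, hr, he'⟩ := List.mem_map.mp hm
            refine ⟨fun r' hr' => ?_, fun c' hc' => PVLine.noConfusion (he' ▸ hc')⟩
            have : r = r' := by rw [← he'] at hr'; injection hr'
            subst this
            exact List.mem_range.mp (List.mem_filter.mp hr).1
        · -- rows untouched by the changed cells stay fixed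
          intro r hr hnr
          have hrrest : PVLine.row r ∉ rest := fun hm => hnr (List.mem_append_left _ hm)
          have hsame : (g.getD r []).getD i 0 = (scanB (colOf g i rows)).getD r 0 := by
            by_contra hd
            apply hnr
            apply List.mem_append_right
            apply List.mem_map.mpr
            refine ⟨r, List.mem_filter.mpr ⟨List.mem_range.mpr hr, ?_⟩, rfl⟩
            rw [Bool.and_eq_true]
            exact ⟨decide_eq_true (fun hh => hd hh.symm), decide_eq_true hrrest⟩
          have hrowu : (colOp g i).getD r [] = g.getD r [] := by
            unfold colOp
            apply row_colWrite_unchanged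
            rw [← hglen] at hsame
            rw [hsame, scanB_eq]
          unfold rowFixed
          rw [hrowu]
          refine hinv.1 r hr ?_
          intro hmem
          rcases List.mem_cons.mp hmem with hm | hm
          · exact PVLine.noConfusion hm
          · exact hrrest hm
        · -- the written column is fixed by idempotence; other columns are unchanged
          intro c hc hnc
          by_cases hci : c = i
          · subst hci
            unfold colFixed colOp
            rw [colOf_colWrite_self cols g c _ (by rw [length_scanGo, length_colOf]) hok hc]
            exact scanGo_idem _ false 0
          · have hcolu : colOf (colOp g i) c (colOp g i).length = colOf g c g.length := by
              rw [length_colOp]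
              unfold colOp
              exact colOf_colWrite_ne g i _ c g.length hci
            unfold colFixed
            rw [hcolu]
            refine hinv.2 c hc ?_
            intro hmem
            rcases List.mem_cons.mp hmem with hm | hm
            · exact hci (by injection hm)
            · exact hnc (List.mem_append_left _ hm)

-- ===== VERDICT (by name: the statement is the Claim_ definition above) =====
theorem transform_spec : Claim_equal_transform := by
  unfold Claim_equal_transform Spec_transform
  intro g _ hpre
  cases g with
  | nil => rfl
  | cons r0 rest =>
    by_cases hr0 : r0 = []
    · simp only [transform, transform_alt, if_pos hr0]
    · simp only [transform, transform_alt, if_neg hr0]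
      have hok : RowsOK r0.length (r0 :: rest) := by
        unfold Pre_transform at hpre
        rcases hpre with h | h | h
        · exact absurd h (by simp)
        · exact absurd (by simpa using h) hr0
        · intro row hrow
          have := h row hrow
          simpa using this
      have hwf0 : WFStack (r0 :: rest).length r0.length
          ((List.range (r0 :: rest).length).map PVLine.row ++
           (List.range r0.length).map PVLine.col) := by
        intro it hit
        rcases List.mem_append.mp hit with hm | hm
        · obtain ⟨r, hr, he'⟩ := List.mem_map.mp hm
          refine ⟨fun r' hr' => ?_, fun c' hc' => PVLine.noConfusion (he' ▸ hc')⟩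
          have : r = r' := by rw [← he'] at hr'; injection hr'
          subst this
          exact List.mem_range.mp hr
        · obtain ⟨c, hc, he'⟩ := List.mem_map.mp hm
          refine ⟨fun r' hr' => PVLine.noConfusion (he' ▸ hr'), fun c' hc' => ?_⟩
          have : c = c' := by rw [← he'] at hc'; injection hc'
          subst this
          exact List.mem_range.mp hc
      have hinv0 : InvB (r0 :: rest).length r0.length (r0 :: rest)
          ((List.range (r0 :: rest).length).map PVLine.row ++
           (List.range r0.length).map PVLine.col) := by
        constructor
        · intro r hr hmem
          exact absurd (List.mem_append_left _
            (List.mem_map.mpr ⟨r, List.mem_range.mpr hr, rfl⟩)) hmem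
        · intro c hc hmem
          exact absurd (List.mem_append_right _
            (List.mem_map.mpr ⟨c, List.mem_range.mpr hc, rfl⟩)) hmem
      obtain ⟨ra, fa⟩ := loopA_inv (r0 :: rest).length r0.length (zerosG (r0 :: rest) + 1)
        (r0 :: rest) (Nat.le_refl _) rfl hok
      obtain ⟨rb, fb⟩ := loopB_inv (r0 :: rest).length r0.length
        ((r0 :: rest).length + r0.length +
          ((r0 :: rest).length + r0.length + 1) * zerosG (r0 :: rest) + 1)
        (r0 :: rest)
        ((List.range (r0 :: rest).length).map PVLine.row ++
         (List.range r0.length).map PVLine.col)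
        (by simp) rfl hok hwf0 hinv0
      exact fix_unique ra fa rb fb
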